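-- pv_equiv track=rewrite | github.com/NEXIZ0/x9 | x9_p1.py | remove_slash
-- ===== SOURCE A (Python) =====
-- def remove_slash(urls):
--     unique_urls = {}
--
--     for url in urls:
--         normalized_url = url.rstrip('/')
--         has_trailing_slash = url.endswith('/')
--
--         if normalized_url in unique_urls:
--             if not unique_urls[normalized_url].endswith('/') and has_trailing_slash:
--                 unique_urls[normalized_url] = url
--         else:
--             unique_urls[normalized_url] = url
--
--     return list(unique_urls.values())
-- ===== SOURCE B (Python) =====
-- def remove_slash(urls):
--     groups = {}
--     for url in urls:
--         groups.setdefault(url.rstrip('/'), []).append(url)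
--     return [next((u for u in vs if u.endswith('/')), vs[0])
--             for vs in groups.values()]
-- ===== Notes on version B (the rewrite author's own statement) =====
-- stated objective: alternative
-- what changed: A keeps a single running representative per normalized key and conditionally replaces it in one pass; B first groups all original urls by their slash-stripped form, then reduces each group to its first slash-terminated variant (or its first element).
import Mathlib
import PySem

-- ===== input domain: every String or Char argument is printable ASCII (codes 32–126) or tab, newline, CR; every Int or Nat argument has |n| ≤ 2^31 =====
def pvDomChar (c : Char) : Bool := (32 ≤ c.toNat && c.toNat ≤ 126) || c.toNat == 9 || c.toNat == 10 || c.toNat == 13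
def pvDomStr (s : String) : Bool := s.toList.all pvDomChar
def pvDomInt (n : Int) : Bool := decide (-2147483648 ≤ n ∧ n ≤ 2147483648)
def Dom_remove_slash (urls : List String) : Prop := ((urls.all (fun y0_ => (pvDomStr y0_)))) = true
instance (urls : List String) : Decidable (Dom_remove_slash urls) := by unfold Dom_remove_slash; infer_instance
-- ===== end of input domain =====

-- B groups urls by their slash-stripped form and then reduces each group to its
-- first slash-terminated variant (or its first element), instead of A's one-pass
-- running representative with conditional replacement; objective: alternative.


-- shared port of the Python builtin `url.rstrip('/')` (PySem has no rstrip-with-chars):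
-- drops exactly the maximal run of trailing '/' characters — exact for every string.
def pyRstripSlash (s : String) : String :=
  String.ofList ((s.toList.reverse.dropWhile (· == '/')).reverse)

-- ===== PORT A =====
-- loop body of A: conditional replacement of the running representative
def stepA (d : PySem.Dict String String) (url : String) : PySem.Dict String String :=
  let normalized_url := pyRstripSlash url
  let has_trailing_slash := PySem.Str.endswith url "/"
  if d.contains normalized_url then
    -- `unique_urls[normalized_url]` : the key is present on this branch, so getD "" is the exact lookup
    if !(PySem.Str.endswith (d.getD normalized_url "") "/") && has_trailing_slash then
      d.insert normalized_url url
    else d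
  else d.insert normalized_url url

def remove_slash (urls : List String) : List String :=
  (urls.foldl stepA PySem.Dict.empty).values

-- ===== PORT B =====
-- `groups.setdefault(key, []).append(url)` has the net effect modify key [] (· ++ [url]) (exact)
def stepB (g : PySem.Dict String (List String)) (url : String) :
    PySem.Dict String (List String) :=
  g.modify (pyRstripSlash url) [] (· ++ [url])

-- `next((u for u in vs if u.endswith('/')), vs[0])`; vs is never empty, so headD "" is exact
def chooseB (vs : List String) : String :=
  match vs.find? (fun u => PySem.Str.endswith u "/") with
  | some u => u
  | none => vs.headD ""

def remove_slash_alt (urls : List String) : List String :=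
  ((urls.foldl stepB PySem.Dict.empty).values).map chooseB

-- ===== PRECONDITION & SPEC =====
def Spec_remove_slash (urls : List String) (out : List String) : Prop := out = remove_slash_alt urls
instance (urls : List String) (out : List String) : Decidable (Spec_remove_slash urls out) := by unfold Spec_remove_slash; infer_instance

-- ===== CLAIM (what is proved, stated in full; the proofs are below) =====
def Claim_equal_remove_slash : Prop := ∀ (urls : List String), Dom_remove_slash urls → Spec_remove_slash urls (remove_slash urls)

-- ===== LEMMAS AND PROOFS =====

-- the map sending a group entry to the corresponding representative entry
def cmap (p : String × List String) : String × String := (p.1, chooseB p.2)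

theorem chooseB_of_find?_eq_none (vs : List String)
    (h : vs.find? (fun u => PySem.Str.endswith u "/") = none) :
    chooseB vs = vs.headD "" := by unfold chooseB; rw [h]

theorem chooseB_of_find?_eq_some (vs : List String) (w : String)
    (h : vs.find? (fun u => PySem.Str.endswith u "/") = some w) :
    chooseB vs = w := by unfold chooseB; rw [h]

-- entries of a dict with Nodup keys are determined by their key
theorem items_inj (d : PySem.Dict String (List String)) (hnd : d.keys.Nodup)
    {p q : String × List String} (hp : p ∈ d.items) (hq : q ∈ d.items) (h1 : p.1 = q.1) :
    p = q := by
  simp only [PySem.Dict.keys] at hnd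
  exact List.inj_on_of_nodup_map hnd hp hq h1

theorem items_injA (d : PySem.Dict String String) (hnd : d.keys.Nodup)
    {p q : String × String} (hp : p ∈ d.items) (hq : q ∈ d.items) (h1 : p.1 = q.1) :
    p = q := by
  simp only [PySem.Dict.keys] at hnd
  exact List.inj_on_of_nodup_map hnd hp hq h1

-- keys of the A-dict and the B-dict coincide under the invariant
theorem keys_of_rel (dA : PySem.Dict String String) (dG : PySem.Dict String (List String))
    (h : dA.items = dG.items.map cmap) : dA.keys = dG.keys := by
  simp only [PySem.Dict.keys, h, List.map_map]
  rfl

-- a group with no slashed element has an unslashed head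
theorem headD_no_slash (vs : List String) (hvs : vs ≠ [])
    (hnone : vs.find? (fun u => PySem.Str.endswith u "/") = none) :
    PySem.Str.endswith (vs.headD "") "/" = false := by
  have := List.find?_eq_none.mp hnone (vs.headD "") (by cases vs <;> simp_all)
  simpa using this

-- the representative update rule of A matches appending to the group and re-choosing
theorem chooseB_append (vs : List String) (hvs : vs ≠ []) (u : String) :
    chooseB (vs ++ [u]) =
      (if !(PySem.Str.endswith (chooseB vs) "/") && PySem.Str.endswith u "/"
       then u else chooseB vs) := by
  rcases hfind : vs.find? (fun u => PySem.Str.endswith u "/") with _ | w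
  · have hch := chooseB_of_find?_eq_none vs hfind
    have hhd := headD_no_slash vs hvs hfind
    by_cases hu : PySem.Str.endswith u "/" = true
    · have h1 : (vs ++ [u]).find? (fun u => PySem.Str.endswith u "/") = some u := by
        rw [List.find?_append, hfind, Option.none_or, List.find?_cons, hu]
      rw [chooseB_of_find?_eq_some _ _ h1, hch]
      rw [hhd, hu]; rfl
    · simp only [Bool.not_eq_true] at hu
      have h1 : (vs ++ [u]).find? (fun u => PySem.Str.endswith u "/") = none := by
        rw [List.find?_append, hfind, Option.none_or, List.find?_cons, hu]
        rfl
      rw [chooseB_of_find?_eq_none _ h1, hch, hu]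
      simp only [Bool.and_false, Bool.false_eq_true, if_false]
      cases vs with
      | nil => exact absurd rfl hvs
      | cons a t => rfl
  · have hw : PySem.Str.endswith w "/" = true :=
      List.find?_some (p := fun u => PySem.Str.endswith u "/") hfind
    have h1 : (vs ++ [u]).find? (fun u => PySem.Str.endswith u "/") = some w := by
      rw [List.find?_append, hfind]; rfl
    rw [chooseB_of_find?_eq_some _ _ h1, chooseB_of_find?_eq_some _ _ hfind, hw]
    rfl

-- one loop step preserves the invariant
theorem rel_step (dA : PySem.Dict String String) (dG : PySem.Dict String (List String))
    (h : dA.items = dG.items.map cmap) (hnd : dG.keys.Nodup)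
    (hne : ∀ p ∈ dG.items, p.2 ≠ []) (u : String) :
    (stepA dA u).items = (stepB dG u).items.map cmap ∧ (stepB dG u).keys.Nodup ∧
      ∀ p ∈ (stepB dG u).items, p.2 ≠ [] := by
  have hkeys := keys_of_rel dA dG h
  have hndA : dA.keys.Nodup := by rw [hkeys]; exact hnd
  set k := pyRstripSlash u with hk
  have hmod : stepB dG u = dG.insert k ((dG.getD k []) ++ [u]) := rfl
  have hcont : dA.contains k = dG.contains k := by
    simp [PySem.Dict.contains_eq_decide_mem_keys, hkeys]
  have hndB : (stepB dG u).keys.Nodup := by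
    rw [hmod]; exact PySem.Dict.nodup_keys_insert _ _ _ hnd
  by_cases hc : dG.contains k = true
  · -- key already present: A conditionally replaces, B appends to the group
    obtain ⟨vs, hmem⟩ : ∃ vs, (k, vs) ∈ dG.items := by
      have : k ∈ dG.keys := by
        have := (PySem.Dict.contains_eq_decide_mem_keys dG k) ▸ hc
        simpa using this
      simp only [PySem.Dict.keys, List.mem_map] at this
      obtain ⟨p, hp, hpk⟩ := this
      exact ⟨p.2, by simpa [← hpk] using hp⟩
    have hvs : vs ≠ [] := hne _ hmem
    have hgetG : dG.getD k [] = vs := PySem.Dict.getD_of_mem_items dG hmem hnd []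
    have hmemA : (k, chooseB vs) ∈ dA.items := by
      rw [h]; exact List.mem_map.mpr ⟨(k, vs), hmem, rfl⟩
    have hgetA : dA.getD k "" = chooseB vs :=
      PySem.Dict.getD_of_mem_items dA hmemA hndA ""
    have hGitems : (stepB dG u).items =
        dG.items.map (fun p => if (p.1 == k) = true then (k, vs ++ [u]) else p) := by
      rw [hmod, hgetG]; exact PySem.Dict.items_insert_of_contains dG _ hc
    -- mapping cmap over the updated groups = pointwise update of the A-dict entries
    have hmapped : (stepB dG u).items.map cmap =
        dA.items.map (fun p => if (p.1 == k) = true then (k, chooseB (vs ++ [u])) else p) := by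
      rw [hGitems, List.map_map, h, List.map_map]
      apply List.map_congr_left
      intro p hp
      by_cases hpk : (p.1 == k) = true
      · have hpeq : p = (k, vs) := items_inj dG hnd hp hmem (by simpa using hpk)
        subst hpeq
        simp [cmap]
      · have hpk' : p.1 ≠ k := by simpa using hpk
        simp [cmap, hpk']
    refine ⟨?_, hndB, ?_⟩
    · -- A side
      simp only [stepA, ← hk, hcont, hc, if_true, hgetA]
      by_cases hrep : (!(PySem.Str.endswith (chooseB vs) "/") && PySem.Str.endswith u "/") = true
      · rw [if_pos hrep, hmapped, PySem.Dict.items_insert_of_contains dA _ (hcont ▸ hc),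
            chooseB_append vs hvs u, hrep]
        simp
      · rw [if_neg hrep, hmapped]
        have hcheq : chooseB (vs ++ [u]) = chooseB vs := by
          rw [chooseB_append vs hvs u]
          simp only [Bool.not_eq_true] at hrep
          rw [hrep]; rfl
        rw [hcheq]
        conv_lhs => rw [show dA.items = dA.items.map id by simp]
        apply List.map_congr_left
        intro p hp
        by_cases hpk : (p.1 == k) = true
        · have hpeq : p = (k, chooseB vs) :=
            items_injA dA hndA hp hmemA (by simpa using hpk)
          subst hpeq; simp
        · simp [hpk]
    · intro p hp
      rw [hGitems] at hp
      obtain ⟨q, hq, hqe⟩ := List.mem_map.mp hp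
      by_cases hqk : (q.1 == k) = true
      · simp only [hqk, if_true] at hqe; rw [← hqe]; simp
      · simp only [hqk] at hqe; rw [← hqe]; exact hne q hq
  · -- fresh key: both dicts append a new entry
    have hcf : dG.contains k = false := by simpa using hc
    have hgetG : dG.getD k [] = [] := PySem.Dict.getD_of_not_contains dG [] hcf
    have hGitems : (stepB dG u).items = dG.items ++ [(k, [u])] := by
      rw [hmod, hgetG]; exact PySem.Dict.items_insert_of_not_contains dG _ hcf
    refine ⟨?_, hndB, ?_⟩
    · simp only [stepA, ← hk, hcont, hcf, Bool.false_eq_true, if_false]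
      rw [PySem.Dict.items_insert_of_not_contains dA _ (by rw [hcont]; exact hcf),
          hGitems, List.map_append, h]
      have : cmap (k, [u]) = (k, u) := by
        unfold cmap
        by_cases hu : PySem.Str.endswith u "/" = true
        · rw [chooseB_of_find?_eq_some [u] u (by rw [List.find?_cons, hu])]
        · simp only [Bool.not_eq_true] at hu
          rw [chooseB_of_find?_eq_none [u] (by rw [List.find?_cons, hu]; rfl)]
          rfl
      simp [this]
    · intro p hp
      rw [hGitems] at hp
      rcases List.mem_append.mp hp with hp | hp
      · exact hne p hp
      · simp only [List.mem_singleton] at hp; rw [hp]; simp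

-- the invariant is preserved by the whole fold
theorem rel_foldl (l : List String) (dA : PySem.Dict String String)
    (dG : PySem.Dict String (List String))
    (h : dA.items = dG.items.map cmap) (hnd : dG.keys.Nodup)
    (hne : ∀ p ∈ dG.items, p.2 ≠ []) :
    (l.foldl stepA dA).items = (l.foldl stepB dG).items.map cmap := by
  induction l generalizing dA dG with
  | nil => simpa using h
  | cons u l ih =>
    obtain ⟨h', hnd', hne'⟩ := rel_step dA dG h hnd hne u
    simpa using ih _ _ h' hnd' hne'

-- ===== VERDICT (by name: the statement is the Claim_ definition above) =====
theorem remove_slash_spec : Claim_equal_remove_slash := by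
  intro urls _
  unfold Spec_remove_slash remove_slash remove_slash_alt
  have h := rel_foldl urls PySem.Dict.empty PySem.Dict.empty rfl (by simp)
    (by intro p hp
        simp only [show (PySem.Dict.empty : PySem.Dict String (List String)).items = []
          from rfl] at hp
        cases hp)
  show (urls.foldl stepA PySem.Dict.empty).items.map (·.2) =
    ((urls.foldl stepB PySem.Dict.empty).items.map (·.2)).map chooseB
  rw [h, List.map_map, List.map_map]
  rfl
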